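-- pv_equiv track=rewrite | github.com/Ace1928/eidosian_forge | archive_forge/code/func_nacl_bindings_pick_scrypt_params.py | nacl_bindings_pick_scrypt_params
-- ===== SOURCE A (Python) =====
-- from typing import Tuple
--
-- def nacl_bindings_pick_scrypt_params(opslimit: int, memlimit: int) -> Tuple[int, int, int]:
--     """Python implementation of libsodium's pickparams"""
--     if opslimit < 32768:
--         opslimit = 32768
--     r = 8
--     if opslimit < memlimit // 32:
--         p = 1
--         maxn = opslimit // (4 * r)
--         for n_log2 in range(1, 63):
--             if 2 ** n_log2 > maxn // 2:
--                 break
--     else: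
--         maxn = memlimit // (r * 128)
--         for n_log2 in range(1, 63):
--             if 2 ** n_log2 > maxn // 2:
--                 break
--         maxrp = opslimit // 4 // 2 ** n_log2
--         if maxrp > 1073741823:
--             maxrp = 1073741823
--         p = maxrp // r
--     return (n_log2, r, p)
-- ===== SOURCE B (Python) =====
-- def _n_log2(maxn):
--     t = maxn // 2
--     if t < 2:
--         return 1
--     return min(62, t.bit_length())
--
--
-- def nacl_bindings_pick_scrypt_params(opslimit, memlimit):
--     opslimit = max(opslimit, 32768)
--     r = 8
--     if opslimit < memlimit // 32:
--         return (_n_log2(opslimit // (4 * r)), r, 1)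
--     n_log2 = _n_log2(memlimit // (r * 128))
--     maxrp = min(opslimit // 4 // 2 ** n_log2, 1073741823)
--     return (n_log2, r, maxrp // r)
-- ===== Notes on version B (the rewrite author's own statement) =====
-- stated objective: simpler
-- what changed: Both 62-step search loops are replaced by a closed form: n_log2 = 1 if maxn//2 < 2 else min(62, (maxn//2).bit_length()), factored into one helper used by both branches.
import Mathlib
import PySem

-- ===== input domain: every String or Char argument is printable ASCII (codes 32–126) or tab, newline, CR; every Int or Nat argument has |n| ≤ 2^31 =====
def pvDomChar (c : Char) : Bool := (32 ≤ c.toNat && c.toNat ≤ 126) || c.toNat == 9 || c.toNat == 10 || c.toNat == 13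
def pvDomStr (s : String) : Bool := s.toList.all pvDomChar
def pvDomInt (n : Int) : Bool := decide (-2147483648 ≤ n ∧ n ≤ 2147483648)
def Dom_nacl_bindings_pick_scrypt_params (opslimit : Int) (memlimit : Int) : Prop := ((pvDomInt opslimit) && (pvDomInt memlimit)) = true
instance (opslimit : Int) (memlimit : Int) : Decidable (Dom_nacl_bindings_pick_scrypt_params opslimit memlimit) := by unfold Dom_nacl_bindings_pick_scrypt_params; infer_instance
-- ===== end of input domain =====

-- B replaces A's two identical 62-step search loops by one closed-form helper using bit_length (objective: simpler).

-- ===== PORT A =====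
-- A's loop 'for n_log2 in range(1,63): if 2**n_log2 > maxn//2: break': first k in [1,62] with
-- 2^k > t; if no k breaks, the loop leaves n_log2 = 62.
def pvLoopA (t : Int) (k : Nat) : Int :=
  if (2 : Int) ^ k > t then (k : Int)
  else if k < 62 then pvLoopA t (k + 1) else 62
termination_by 62 - k

def nacl_bindings_pick_scrypt_params (opslimit : Int) (memlimit : Int) : Int × Int × Int :=
  let opslimit := if opslimit < 32768 then 32768 else opslimit
  let r : Int := 8
  if opslimit < PySem.Int.floordiv memlimit 32 then
    let p : Int := 1
    let maxn := PySem.Int.floordiv opslimit (4 * r)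
    let n_log2 := pvLoopA (PySem.Int.floordiv maxn 2) 1
    (n_log2, r, p)
  else
    let maxn := PySem.Int.floordiv memlimit (r * 128)
    let n_log2 := pvLoopA (PySem.Int.floordiv maxn 2) 1
    let maxrp := PySem.Int.floordiv (PySem.Int.floordiv opslimit 4) ((2 : Int) ^ n_log2.toNat)
    let maxrp := if maxrp > 1073741823 then 1073741823 else maxrp
    let p := PySem.Int.floordiv maxrp r
    (n_log2, r, p)

-- ===== PORT B =====
def pvNLog2 (maxn : Int) : Int :=
  let t := PySem.Int.floordiv maxn 2
  if t < 2 then 1 else min 62 ((PySem.Int.bitLength t : Int))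

def nacl_bindings_pick_scrypt_params_alt (opslimit : Int) (memlimit : Int) : Int × Int × Int :=
  let opslimit := max opslimit 32768
  let r : Int := 8
  if opslimit < PySem.Int.floordiv memlimit 32 then
    (pvNLog2 (PySem.Int.floordiv opslimit (4 * r)), r, 1)
  else
    let n_log2 := pvNLog2 (PySem.Int.floordiv memlimit (r * 128))
    let maxrp := min (PySem.Int.floordiv (PySem.Int.floordiv opslimit 4) ((2 : Int) ^ n_log2.toNat)) 1073741823
    (n_log2, r, PySem.Int.floordiv maxrp r)

-- ===== PRECONDITION & SPEC =====
def Spec_nacl_bindings_pick_scrypt_params (opslimit : Int) (memlimit : Int) (out : Int × Int × Int) : Prop := out = nacl_bindings_pick_scrypt_params_alt opslimit memlimit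
instance (opslimit : Int) (memlimit : Int) (out : Int × Int × Int) : Decidable (Spec_nacl_bindings_pick_scrypt_params opslimit memlimit out) := by unfold Spec_nacl_bindings_pick_scrypt_params; infer_instance

-- ===== CLAIM (what is proved, stated in full; the proofs are below) =====
def Claim_equal_nacl_bindings_pick_scrypt_params : Prop := ∀ (opslimit : Int) (memlimit : Int), Dom_nacl_bindings_pick_scrypt_params opslimit memlimit → Spec_nacl_bindings_pick_scrypt_params opslimit memlimit (nacl_bindings_pick_scrypt_params opslimit memlimit)

-- ===== LEMMAS AND PROOFS =====

-- the loop returns b whenever 2^b > t, every earlier exponent fails, and b ≤ 62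
theorem pvLoopA_eq_of (t : Int) (b : Nat) (hb1 : 1 ≤ b) (hb62 : b ≤ 62)
    (hbig : t < (2 : Int) ^ b) (hsmall : ∀ m : Nat, 1 ≤ m → m < b → (2 : Int) ^ m ≤ t) :
    ∀ k : Nat, 1 ≤ k → k ≤ b → pvLoopA t k = (b : Int) := by
  intro k hk1 hkb
  induction hn : b - k generalizing k with
  | zero =>
    have hkb' : k = b := by omega
    subst hkb'
    rw [pvLoopA]
    simp [hbig]
  | succ n ih =>
    have hklt : k < b := by omega
    have hfail : ¬ (2 : Int) ^ k > t := not_lt.mpr (hsmall k hk1 hklt)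
    rw [pvLoopA]
    have hk62 : k < 62 := by omega
    simp only [hfail, if_false, hk62, if_true]
    exact ih (k + 1) (by omega) (by omega) (by omega)

-- closed form for the loop, for any t below 2^62 (all inputs in Dom produce such t)
theorem pvLoopA_eq_closed (t : Int) (ht : t < (2 : Int) ^ 62) :
    pvLoopA t 1 = (if t < 2 then 1 else min 62 ((PySem.Int.bitLength t : Int))) := by
  by_cases h2 : t < 2
  · simp only [h2, if_true]
    exact pvLoopA_eq_of t 1 le_rfl (by omega) (by norm_num; omega)
      (fun m hm1 hm2 => absurd (by omega : m < 1) (by omega)) 1 le_rfl le_rfl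
  · rw [not_lt] at h2
    set n : Nat := PySem.Int.bitLength t with hn
    have htpos : (0 : Int) < t := by omega
    have hne : t ≠ 0 := by omega
    have habs : (t.natAbs : Int) = t := Int.natAbs_of_nonneg (by omega)
    -- 2 ≤ t gives bitLength ≥ 2
    have hlow : 2 ^ (n - 1) ≤ t.natAbs := PySem.Int.two_pow_bitLength_le t hne
    have hhigh : t.natAbs < 2 ^ n := PySem.Int.lt_two_pow_bitLength t
    have hn2 : 2 ≤ n := by
      by_contra hlt
      have : n ≤ 1 := by omega
      have : t.natAbs < 2 ^ 1 := lt_of_lt_of_le hhigh (Nat.pow_le_pow_right (by omega) this)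
      omega
    have hn62 : n ≤ 62 := by
      by_contra hgt
      have h62 : (62 : Nat) ≤ n - 1 := by omega
      have : (2 : Nat) ^ 62 ≤ 2 ^ (n - 1) := Nat.pow_le_pow_right (by omega) h62
      have h1 : (2 : Nat) ^ 62 ≤ t.natAbs := le_trans this hlow
      have : ((2 : Nat) ^ 62 : Int) ≤ (t.natAbs : Int) := by exact_mod_cast h1
      rw [habs] at this
      push_cast at this
      omega
    have hbig : t < (2 : Int) ^ n := by
      have : (t.natAbs : Int) < ((2 : Nat) ^ n : Int) := by exact_mod_cast hhigh
      rw [habs] at this; push_cast at this; exact this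
    have hsmall : ∀ m : Nat, 1 ≤ m → m < n → (2 : Int) ^ m ≤ t := by
      intro m hm1 hmn
      have h1 : (2 : Nat) ^ m ≤ 2 ^ (n - 1) := Nat.pow_le_pow_right (by omega) (by omega)
      have h2' : (2 : Nat) ^ m ≤ t.natAbs := le_trans h1 hlow
      have : ((2 : Nat) ^ m : Int) ≤ (t.natAbs : Int) := by exact_mod_cast h2'
      rw [habs] at this; push_cast at this; exact this
    have heq : pvLoopA t 1 = (n : Int) :=
      pvLoopA_eq_of t n (by omega) hn62 hbig hsmall 1 le_rfl (by omega)
    rw [heq, if_neg (by omega : ¬ t < 2)]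
    exact (min_eq_right (by exact_mod_cast hn62 : (n : Int) ≤ 62)).symm

-- t = maxn // 2 is below 2^62 for every maxn with |maxn| ≤ 2^31
theorem pvHalf_lt (maxn : Int) (h : maxn ≤ 2147483648) :
    PySem.Int.floordiv maxn 2 < (2 : Int) ^ 62 := by
  rw [PySem.Int.floordiv_eq_ediv_of_pos (by omega)]
  omega

-- floordiv by a positive constant keeps the 2^31 bound
theorem pvDiv_le (x c : Int) (hx : x ≤ 2147483648) (hc : 0 < c) :
    PySem.Int.floordiv x c ≤ 2147483648 := by
  rw [PySem.Int.floordiv_eq_ediv_of_pos hc]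
  rcases (by omega : 0 ≤ x ∨ x < 0) with h | h
  · exact le_trans (Int.ediv_le_self c h) hx
  · have : x / c ≤ 0 := by
      have h0 : x / c ≤ 0 / c := Int.ediv_le_ediv hc (by omega)
      simpa using h0
    omega

-- ===== VERDICT (by name: the statement is the Claim_ definition above) =====
theorem nacl_bindings_pick_scrypt_params_spec : Claim_equal_nacl_bindings_pick_scrypt_params := by
  intro opslimit memlimit hdom
  unfold Dom_nacl_bindings_pick_scrypt_params pvDomInt at hdom
  simp only [Bool.and_eq_true, decide_eq_true_eq] at hdom
  obtain ⟨⟨ho1, ho2⟩, hm1, hm2⟩ := hdom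
  unfold Spec_nacl_bindings_pick_scrypt_params
  unfold nacl_bindings_pick_scrypt_params nacl_bindings_pick_scrypt_params_alt pvNLog2
  have hclamp : (if opslimit < 32768 then (32768 : Int) else opslimit) = max opslimit 32768 := by
    rcases (by omega : opslimit < 32768 ∨ 32768 ≤ opslimit) with h | h
    · simp [h, max_eq_right (le_of_lt h)]
    · simp [not_lt.mpr h, max_eq_left h]
  rw [hclamp]
  set op : Int := max opslimit 32768 with hop
  have hopb : op ≤ 2147483648 := by
    have : opslimit ≤ 2147483648 := ho2
    simp only [hop]; omega
  by_cases hbr : op < PySem.Int.floordiv memlimit 32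
  · simp only [hbr, if_true]
    rw [pvLoopA_eq_closed _ (pvHalf_lt _ (pvDiv_le _ _ hopb (by norm_num)))]
  · simp only [hbr, if_false]
    rw [pvLoopA_eq_closed _ (pvHalf_lt _ (pvDiv_le _ _ hm2 (by norm_num)))]
    have hmin : ∀ x : Int, (if x > 1073741823 then (1073741823 : Int) else x) = min x 1073741823 := by
      intro x
      rcases (by omega : (1073741823 : Int) < x ∨ x ≤ 1073741823) with h | h
      · simp [h, min_eq_right (le_of_lt h)]
      · simp [not_lt.mpr h, min_eq_left h]
    rw [hmin]
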